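-- pv_equiv track=rewrite | github.com/MHNewland/TicketGraph | GraphData/GraphData.py | create_sql_list
-- ===== SOURCE A (Python) =====
-- def create_sql_list(data_name, list):
--     sql_list = []
--     for item in list:
--         sql_list.append(f'{data_name} = "{item}"')
--         sql_list.append(" or ")
--     else:
--         sql_list.pop()
--     return sql_list
-- ===== SOURCE B (Python) =====
-- def create_sql_list(data_name, list):
--     conds = [f'{data_name} = "{item}"' for item in list]
--     result = [conds[0]]
--     for cond in conds[1:]:
--         result.append(" or ")
--         result.append(cond)
--     return result
-- ===== Notes on version B (the rewrite author's own statement) =====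
-- stated objective: alternative
-- what changed: B builds all condition strings with one comprehension, seeds the result with the first condition, and interleaves ' or ' before each remaining condition, instead of A's append-both-then-pop-the-trailing-separator pattern.
import Mathlib
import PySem

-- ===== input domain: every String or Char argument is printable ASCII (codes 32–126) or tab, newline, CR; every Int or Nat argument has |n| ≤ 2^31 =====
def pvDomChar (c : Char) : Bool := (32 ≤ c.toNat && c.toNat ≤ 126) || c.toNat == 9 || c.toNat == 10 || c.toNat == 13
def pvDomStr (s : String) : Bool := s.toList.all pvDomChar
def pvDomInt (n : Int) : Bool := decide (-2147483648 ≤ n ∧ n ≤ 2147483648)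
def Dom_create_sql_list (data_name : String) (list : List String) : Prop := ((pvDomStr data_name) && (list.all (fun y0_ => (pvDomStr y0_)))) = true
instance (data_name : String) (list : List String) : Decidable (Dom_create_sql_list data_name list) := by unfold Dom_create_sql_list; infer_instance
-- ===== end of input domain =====

-- B interleaves ' or ' before each condition after a seeded first element instead of A's append-then-pop; same values, same cost.
-- Both A and B raise IndexError on an empty list (A: pop from empty, B: conds[0]); Pre_ excludes it.

-- ===== PORT A =====
def create_sql_list (data_name : String) (list : List String) : List String :=
  let sql_list :=
    list.foldl (fun acc item => (acc ++ [data_name ++ " = \"" ++ item ++ "\""]) ++ [" or "]) []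
  match PySem.List.pop? sql_list (-1) with
  | some (_, rest) => rest
  | none => []   -- IndexError (empty list); excluded by Pre_

-- ===== PORT B =====
def create_sql_list_alt (data_name : String) (list : List String) : List String :=
  let conds := list.map (fun item => data_name ++ " = \"" ++ item ++ "\"")
  match PySem.List.pyGet? conds 0 with
  | none => []   -- IndexError (empty list); excluded by Pre_
  | some c =>
    (PySem.List.slice conds (some 1) none).foldl
      (fun result cond => (result ++ [" or "]) ++ [cond]) [c]

-- ===== PRECONDITION & SPEC =====
-- A raises IndexError (pop from empty list) when list = []; excluded.
def Pre_create_sql_list (data_name : String) (list : List String) : Prop := list ≠ []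
instance (data_name : String) (list : List String) : Decidable (Pre_create_sql_list data_name list) := by unfold Pre_create_sql_list; infer_instance
def pvWitness_create_sql_list : String × List String := ("ticket", ["open", "closed"])

def Spec_create_sql_list (data_name : String) (list : List String) (out : List String) : Prop := out = create_sql_list_alt data_name list
instance (data_name : String) (list : List String) (out : List String) : Decidable (Spec_create_sql_list data_name list out) := by unfold Spec_create_sql_list; infer_instance

-- ===== CLAIM =====
def Claim_equal_create_sql_list : Prop := ∀ (data_name : String) (list : List String), Dom_create_sql_list data_name list → Pre_create_sql_list data_name list → Spec_create_sql_list data_name list (create_sql_list data_name list)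

-- ===== LEMMAS AND PROOFS =====
theorem foldA_flat (f : String → String) (l : List String) (acc : List String) :
    l.foldl (fun acc item => (acc ++ [f item]) ++ [" or "]) acc
      = acc ++ l.flatMap (fun item => [f item, " or "]) := by
  induction l generalizing acc with
  | nil => simp
  | cons x xs ih => simp [List.foldl, ih, List.flatMap_cons, List.flatMap]

theorem foldB_flat (l : List String) (acc : List String) :
    l.foldl (fun result cond => (result ++ [" or "]) ++ [cond]) acc
      = acc ++ l.flatMap (fun cond => [" or ", cond]) := by
  induction l generalizing acc with
  | nil => simp
  | cons x xs ih => simp [List.foldl, ih, List.flatMap_cons, List.flatMap]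

theorem pop_neg_one_of_ne_nil {α : Type} (l : List α) (h : l ≠ []) :
    PySem.List.pop? l (-1) = some (l.getLast h, l.dropLast) := by
  conv_lhs => rw [← List.dropLast_append_getLast h]
  rw [PySem.List.pop?_last]

theorem flat_dropLast (f : String → String) (x : String) (xs : List String) :
    ((x :: xs).flatMap (fun item => [f item, " or "])).dropLast
      = f x :: xs.flatMap (fun cond => [" or ", f cond]) := by
  induction xs generalizing x with
  | nil => simp
  | cons y ys ih =>
    have h := ih y
    rw [show (x :: y :: ys).flatMap (fun item => [f item, " or "])
          = [f x, " or "] ++ (y :: ys).flatMap (fun item => [f item, " or "]) from by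
            simp [List.flatMap_cons],
        List.dropLast_append_of_ne_nil (by simp [List.flatMap_cons]), h]
    simp [List.flatMap_cons]

-- ===== VERDICT =====
theorem create_sql_list_spec : Claim_equal_create_sql_list := by
  intro data_name list _ hpre
  unfold Spec_create_sql_list create_sql_list create_sql_list_alt
  obtain ⟨x, xs, rfl⟩ := List.exists_cons_of_ne_nil hpre
  simp only [foldA_flat, List.nil_append, List.map_cons,
    PySem.List.pyGet?_zero_cons, PySem.List.slice_from_one, List.tail_cons, foldB_flat]
  have hne : ((x :: xs).flatMap (fun item => [data_name ++ " = \"" ++ item ++ "\"", " or "])) ≠ [] := by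
    simp [List.flatMap_cons]
  rw [pop_neg_one_of_ne_nil _ hne]
  simp only [flat_dropLast (fun item => data_name ++ " = \"" ++ item ++ "\"") x xs]
  simp [List.flatMap_map]
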